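-- pv_equiv track=rewrite | github.com/llikethat/ComfyUI-SAM3DBody2abc | nodes/foot_contact_test.py | _apply_min_contact_frames
-- ===== SOURCE A (Python) =====
-- from typing import Dict, List, Optional, Tuple
--
-- def _apply_min_contact_frames(
--
--     contact_history: List[bool],
--     min_frames: int
-- ) -> List[bool]:
--     """Apply minimum contact frames filter."""
--     if min_frames <= 1:
--         return contact_history
--
--     result = []
--     consecutive = 0
--
--     for contact in contact_history:
--         if contact:
--             consecutive += 1
--         else:
--             consecutive = 0
--         result.append(consecutive >= min_frames)
--
--     return result
-- ===== SOURCE B (Python) =====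
-- def _apply_min_contact_frames(contact_history, min_frames):
--     """Run-based: scan maximal runs of equal values; a True run of length n
--     expands to [j >= min_frames for j in 1..n], a False run to n Falses."""
--     if min_frames <= 1:
--         return contact_history
--     result = []
--     i = 0
--     n = len(contact_history)
--     while i < n:
--         j = i
--         while j < n and contact_history[j] == contact_history[i]:
--             j += 1
--         run = j - i
--         if contact_history[i]:
--             result.extend(k >= min_frames for k in range(1, run + 1))
--         else:
--             result.extend([False] * run)
--         i = j
--     return result
-- ===== Notes on version B (the rewrite author's own statement) =====
-- stated objective: alternative
-- what changed: Replaces the per-element consecutive-counter loop by a run-length decomposition: scan maximal runs of equal values and expand each run at once (a True run of length n becomes the thresholded range 1..n, a False run n Falses).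
import Mathlib
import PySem

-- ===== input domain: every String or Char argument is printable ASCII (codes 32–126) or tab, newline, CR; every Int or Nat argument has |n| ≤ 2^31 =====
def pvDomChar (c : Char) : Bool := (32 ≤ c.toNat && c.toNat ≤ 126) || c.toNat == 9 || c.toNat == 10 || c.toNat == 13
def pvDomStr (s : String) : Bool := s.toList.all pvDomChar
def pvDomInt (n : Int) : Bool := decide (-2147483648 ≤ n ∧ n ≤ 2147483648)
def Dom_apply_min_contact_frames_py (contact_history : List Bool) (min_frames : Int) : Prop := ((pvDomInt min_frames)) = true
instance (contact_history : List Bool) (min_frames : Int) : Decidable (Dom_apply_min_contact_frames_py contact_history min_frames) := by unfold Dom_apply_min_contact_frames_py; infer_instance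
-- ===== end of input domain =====

-- B replaces A's per-element consecutive counter by a run-length decomposition
-- (scan each maximal run of equal values and expand it at once); alternative structure, same cost.

-- ===== PORT A =====
-- loop 'for contact in contact_history' carrying the state (result, consecutive)
def apply_min_contact_frames_py (contact_history : List Bool) (min_frames : Int) : List Bool :=
  if min_frames ≤ 1 then contact_history
  else
    (contact_history.foldl
      (fun (st : List Bool × Int) contact =>
        let consecutive := if contact then st.2 + 1 else 0
        (st.1 ++ [decide (min_frames ≤ consecutive)], consecutive))
      (([] : List Bool), (0 : Int))).1

-- ===== PORT B =====
-- the inner 'while' scan of one maximal run = takeWhile/dropWhile on equality with the run's head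
def pvRunsB : List Bool → List (Bool × Nat)
  | [] => []
  | c :: rest =>
      (c, (rest.takeWhile (· == c)).length + 1) :: pvRunsB (rest.dropWhile (· == c))
termination_by l => l.length
decreasing_by
  simp only [List.length_cons]
  exact Nat.lt_succ_of_le (List.length_dropWhile_le _ _)

-- expansion of one run (True run → thresholded range 1..n, False run → n Falses)
def pvExpandB (min_frames : Int) (g : Bool × Nat) : List Bool :=
  if g.1 then (List.range' 1 g.2).map (fun k : Nat => decide (min_frames ≤ (k : Int)))
  else List.replicate g.2 false

def apply_min_contact_frames_py_alt (contact_history : List Bool) (min_frames : Int) : List Bool :=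
  if min_frames ≤ 1 then contact_history
  else (pvRunsB contact_history).flatMap (pvExpandB min_frames)

-- ===== PRECONDITION & SPEC =====
def Spec_apply_min_contact_frames_py (contact_history : List Bool) (min_frames : Int) (out : List Bool) : Prop := out = apply_min_contact_frames_py_alt contact_history min_frames
instance (contact_history : List Bool) (min_frames : Int) (out : List Bool) : Decidable (Spec_apply_min_contact_frames_py contact_history min_frames out) := by unfold Spec_apply_min_contact_frames_py; infer_instance

-- ===== CLAIM (what is proved, stated in full; the proofs are below) =====
def Claim_equal_apply_min_contact_frames_py : Prop := ∀ (contact_history : List Bool) (min_frames : Int), Dom_apply_min_contact_frames_py contact_history min_frames → Spec_apply_min_contact_frames_py contact_history min_frames (apply_min_contact_frames_py contact_history min_frames)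

-- ===== LEMMAS AND PROOFS =====

-- A's loop body as a structural recursion with the counter as an argument
def pvACore (min_frames : Int) : List Bool → Int → List Bool
  | [], _ => []
  | c :: rest, k =>
      let k' := if c then k + 1 else 0
      decide (min_frames ≤ k') :: pvACore min_frames rest k'

lemma pvFoldl_eq_aCore (min_frames : Int) :
    ∀ (l : List Bool) (acc : List Bool) (k : Int),
      (l.foldl
        (fun (st : List Bool × Int) contact =>
          let consecutive := if contact then st.2 + 1 else 0
          (st.1 ++ [decide (min_frames ≤ consecutive)], consecutive))
        (acc, k)).1 = acc ++ pvACore min_frames l k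
  | [], acc, k => by simp [pvACore]
  | c :: rest, acc, k => by
      simp only [List.foldl_cons, pvACore]
      rw [pvFoldl_eq_aCore]
      simp

-- a run of Trues: the counter counts up from k
lemma pvACore_true_run (min_frames : Int) :
    ∀ (tw t : List Bool) (k : Int), (∀ x ∈ tw, x = true) →
      pvACore min_frames (tw ++ t) k =
        (List.range' 1 tw.length).map (fun j : Nat => decide (min_frames ≤ k + (j : Int)))
          ++ pvACore min_frames t (k + (tw.length : Int))
  | [], t, k, _ => by simp
  | x :: tw, t, k, h => by
      have hx : x = true := h x (List.mem_cons_self)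
      subst hx
      have step : pvACore min_frames ((true :: tw) ++ t) k
          = decide (min_frames ≤ k + 1) :: pvACore min_frames (tw ++ t) (k + 1) := rfl
      rw [step, pvACore_true_run min_frames tw t (k + 1)
        (fun y hy => h y (List.mem_cons_of_mem _ hy))]
      have hshift : List.range' 2 tw.length = (List.range' 1 tw.length).map (· + 1) := by
        simp only [List.range'_eq_map_range, List.map_map]
        apply List.map_congr_left; intro a _; simp; omega
      simp only [List.length_cons, List.range'_succ, List.map_cons, hshift, List.map_map]
      congr 1
      congr 1
      · apply List.map_congr_left
        intro a _
        simp only [Function.comp_apply]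
        apply decide_eq_decide.mpr
        push_cast
        omega
      · congr 1
        push_cast
        ring

-- a run of Falses: the counter stays 0 and every output is False (min_frames ≥ 2)
lemma pvACore_false_run (min_frames : Int) (hmf : ¬ min_frames ≤ 1) :
    ∀ (tw t : List Bool), (∀ x ∈ tw, x = false) →
      pvACore min_frames (tw ++ t) 0 = List.replicate tw.length false ++ pvACore min_frames t 0
  | [], t, _ => by simp
  | x :: tw, t, h => by
      have hx : x = false := h x (List.mem_cons_self)
      subst hx
      have step : pvACore min_frames ((false :: tw) ++ t) 0
          = decide (min_frames ≤ 0) :: pvACore min_frames (tw ++ t) 0 := rfl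
      rw [step, pvACore_false_run min_frames hmf tw t
        (fun y hy => h y (List.mem_cons_of_mem _ hy))]
      have : decide (min_frames ≤ 0) = false := by simp; omega
      simp [this, List.replicate_succ]

-- after a True run the next element (if any) is False, so the incoming counter is irrelevant
lemma pvACore_reset (min_frames : Int) (t : List Bool) (k : Int)
    (h : t = [] ∨ ∃ t', t = false :: t') :
    pvACore min_frames t k = pvACore min_frames t 0 := by
  rcases h with h | ⟨t', rfl⟩
  · subst h; rfl
  · rfl

lemma pvDropWhile_shape (c : Bool) (l : List Bool) :
    l.dropWhile (· == c) = [] ∨ ∃ t, l.dropWhile (· == c) = (!c) :: t := by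
  induction l with
  | nil => exact Or.inl rfl
  | cons x xs ih =>
      by_cases hx : x = c
      · subst hx
        simpa [List.dropWhile_cons] using ih
      · right
        refine ⟨xs, ?_⟩
        have hbe : (x == c) = false := by simp [hx]
        have hx' : x = !c := by cases x <;> cases c <;> simp_all
        simp [hx']

-- main: A's recursion equals B's run expansion
lemma pvMain (min_frames : Int) (hmf : ¬ min_frames ≤ 1) :
    ∀ l : List Bool,
      pvACore min_frames l 0 = (pvRunsB l).flatMap (pvExpandB min_frames)
  | [] => by simp [pvRunsB, pvACore]
  | c :: rest => by
      have hrec := pvMain min_frames hmf (rest.dropWhile (· == c))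
      have hdecomp : rest = rest.takeWhile (· == c) ++ rest.dropWhile (· == c) :=
        (List.takeWhile_append_dropWhile).symm
      rw [pvRunsB, List.flatMap_cons]
      cases c with
      | false =>
          have htw : ∀ x ∈ rest.takeWhile (· == false), x = false := by
            intro x hx
            simpa using List.mem_takeWhile_imp hx
          have step : pvACore min_frames (false :: rest) 0
              = decide (min_frames ≤ 0) :: pvACore min_frames rest 0 := rfl
          rw [step]
          conv_lhs => rw [hdecomp]
          rw [pvACore_false_run min_frames hmf _ _ htw, hrec]
          have hd0 : decide (min_frames ≤ 0) = false := by simp; omega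
          simp [pvExpandB, hd0, List.replicate_succ]
      | true =>
          have htw : ∀ x ∈ (true :: rest.takeWhile (· == true)), x = true := by
            intro x hx
            rcases List.mem_cons.mp hx with h | h
            · exact h
            · simpa using List.mem_takeWhile_imp h
          have hdw : rest.dropWhile (· == true) = []
              ∨ ∃ t', rest.dropWhile (· == true) = false :: t' := by
            simpa using pvDropWhile_shape true rest
          conv_lhs => rw [show (true :: rest)
            = (true :: rest.takeWhile (· == true)) ++ rest.dropWhile (· == true) from by
              rw [List.cons_append, ← hdecomp]]
          rw [pvACore_true_run min_frames _ _ 0 htw, pvACore_reset min_frames _ _ hdw, hrec]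
          simp only [pvExpandB, List.length_cons, if_pos]
          congr 1
          apply List.map_congr_left
          intro a _
          simp
termination_by l => l.length
decreasing_by
  simp only [List.length_cons]
  exact Nat.lt_succ_of_le (List.length_dropWhile_le _ _)

-- ===== VERDICT (by name: the statement is the Claim_ definition above) =====
theorem apply_min_contact_frames_py_spec : Claim_equal_apply_min_contact_frames_py := by
  intro ch mf _
  unfold Spec_apply_min_contact_frames_py apply_min_contact_frames_py apply_min_contact_frames_py_alt
  by_cases h : mf ≤ 1
  · simp [h]
  · simp only [if_neg h]
    rw [pvFoldl_eq_aCore, List.nil_append, pvMain mf h]
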